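-- pv_equiv track=rewrite | github.com/audio-forge-rs/skipper | tools/validate_program.py | get_scale_notes
-- ===== SOURCE A (Python) =====
-- SCALES = {
--     'major': [0, 2, 4, 5, 7, 9, 11],
--     'minor': [0, 2, 3, 5, 7, 8, 10],
--     'dorian': [0, 2, 3, 5, 7, 9, 10],
--     'mixolydian': [0, 2, 4, 5, 7, 9, 10],
--     'pentatonic_major': [0, 2, 4, 7, 9],
--     'pentatonic_minor': [0, 3, 5, 7, 10],
--     'blues': [0, 3, 5, 6, 7, 10],
--     'chromatic': list(range(12)),
-- }
--
-- def get_scale_notes(root: int, scale_name: str) -> set[int]: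
--     """Get all MIDI notes in a scale across all octaves."""
--     if scale_name not in SCALES:
--         return set()
--     intervals = SCALES[scale_name]
--     notes = set()
--     for octave in range(11):
--         base = octave * 12
--         for interval in intervals:
--             note = base + (root % 12) + interval
--             if 0 <= note <= 127:
--                 notes.add(note)
--     return notes
-- ===== SOURCE B (Python) =====
-- SCALES = {
--     'major': [0, 2, 4, 5, 7, 9, 11],
--     'minor': [0, 2, 3, 5, 7, 8, 10],
--     'dorian': [0, 2, 3, 5, 7, 9, 10],
--     'mixolydian': [0, 2, 4, 5, 7, 9, 10],
--     'pentatonic_major': [0, 2, 4, 7, 9],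
--     'pentatonic_minor': [0, 3, 5, 7, 10],
--     'blues': [0, 3, 5, 6, 7, 10],
--     'chromatic': list(range(12)),
-- }
--
-- def get_scale_notes(root: int, scale_name: str) -> set[int]:
--     """Get all MIDI notes in a scale across all octaves."""
--     if scale_name not in SCALES:
--         return set()
--     residues = set(SCALES[scale_name])
--     return {n for n in range(root % 12, 128) if (n - root) % 12 in residues}
-- ===== Notes on version B (the rewrite author's own statement) =====
-- stated objective: simpler
-- what changed: Replaces the nested octave-by-interval loops with a per-note 0<=note<=127 bounds check by a single linear scan over candidate notes n = root%12 .. 127 that keeps n exactly when its interval class (n - root) % 12 lies in the scale's interval set.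
import Mathlib
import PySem

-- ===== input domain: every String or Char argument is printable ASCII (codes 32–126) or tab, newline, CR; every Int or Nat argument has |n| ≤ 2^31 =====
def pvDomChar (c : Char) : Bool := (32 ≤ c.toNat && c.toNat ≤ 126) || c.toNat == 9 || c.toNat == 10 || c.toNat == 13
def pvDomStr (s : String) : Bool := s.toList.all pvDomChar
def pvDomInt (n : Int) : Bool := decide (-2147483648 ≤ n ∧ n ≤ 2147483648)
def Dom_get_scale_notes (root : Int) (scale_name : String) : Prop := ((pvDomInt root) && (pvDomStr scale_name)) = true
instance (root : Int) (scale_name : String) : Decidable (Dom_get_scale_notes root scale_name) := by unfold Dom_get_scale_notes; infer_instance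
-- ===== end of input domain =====

-- B replaces the nested octave×interval loops (with a per-note bounds check) by a single
-- scan n = root%12 .. 127 keeping the n whose interval class (n - root) % 12 is in the scale
-- (objective: simpler — one loop, no bounds branch). Return value compared as a set.

-- ===== PORT A =====
-- module-level constant SCALES (shared by A and B, as in the Python module)
def pvSCALES : PySem.Dict String (List Int) :=
  ⟨[("major", [0, 2, 4, 5, 7, 9, 11]),
    ("minor", [0, 2, 3, 5, 7, 8, 10]),
    ("dorian", [0, 2, 3, 5, 7, 9, 10]),
    ("mixolydian", [0, 2, 4, 5, 7, 9, 10]),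
    ("pentatonic_major", [0, 2, 4, 7, 9]),
    ("pentatonic_minor", [0, 3, 5, 7, 10]),
    ("blues", [0, 3, 5, 6, 7, 10]),
    ("chromatic", PySem.List.pyRange 0 12 1)]⟩

def get_scale_notes (root : Int) (scale_name : String) : List Int :=
  match PySem.Dict.get? pvSCALES scale_name with
  | none => PySem.Set.empty
  | some intervals =>
    (PySem.List.pyRange 0 11 1).foldl (fun notes octave =>
      let base := octave * 12
      intervals.foldl (fun notes interval =>
        let note := base + PySem.Int.mod root 12 + interval
        if 0 ≤ note ∧ note ≤ 127 then PySem.Set.add notes note else notes) notes)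
      PySem.Set.empty

-- ===== PORT B =====
def get_scale_notes_alt (root : Int) (scale_name : String) : List Int :=
  match PySem.Dict.get? pvSCALES scale_name with
  | none => PySem.Set.empty
  | some intervals =>
    let residues := PySem.Set.ofList intervals
    (PySem.List.pyRange (PySem.Int.mod root 12) 128 1).foldl
      (fun s n => if PySem.Set.contains residues (PySem.Int.mod (n - root) 12) then PySem.Set.add s n else s)
      PySem.Set.empty

-- ===== PRECONDITION & SPEC =====
def Spec_get_scale_notes (root : Int) (scale_name : String) (out : List Int) : Prop := out = get_scale_notes_alt root scale_name
instance (root : Int) (scale_name : String) (out : List Int) : Decidable (Spec_get_scale_notes root scale_name out) := by unfold Spec_get_scale_notes; infer_instance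

-- ===== CLAIM (what is proved, stated in full; the proofs are below) =====
def Claim_equal_get_scale_notes : Prop := ∀ (root : Int) (scale_name : String), Dom_get_scale_notes root scale_name → Spec_get_scale_notes root scale_name (get_scale_notes root scale_name)

-- ===== LEMMAS AND PROOFS =====

-- A's loop with the (constant) value root % 12 abstracted out
def pvCoreA (intervals : List Int) (r : Int) : List Int :=
  (PySem.List.pyRange 0 11 1).foldl (fun notes octave =>
    let base := octave * 12
    intervals.foldl (fun notes interval =>
      let note := base + r + interval
      if 0 ≤ note ∧ note ≤ 127 then PySem.Set.add notes note else notes) notes)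
    PySem.Set.empty

-- B's loop with root replaced by r = root % 12 (same value mod 12)
def pvCoreB (intervals : List Int) (r : Int) : List Int :=
  let residues := PySem.Set.ofList intervals
  (PySem.List.pyRange r 128 1).foldl
    (fun s n => if PySem.Set.contains residues (PySem.Int.mod (n - r) 12) then PySem.Set.add s n else s)
    PySem.Set.empty

lemma pvA_core (root : Int) (scale_name : String) :
    get_scale_notes root scale_name =
      match PySem.Dict.get? pvSCALES scale_name with
      | none => PySem.Set.empty
      | some intervals => pvCoreA intervals (PySem.Int.mod root 12) := rfl

lemma pvB_core (root : Int) (scale_name : String) :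
    get_scale_notes_alt root scale_name =
      match PySem.Dict.get? pvSCALES scale_name with
      | none => PySem.Set.empty
      | some intervals => pvCoreB intervals (PySem.Int.mod root 12) := by
  unfold get_scale_notes_alt pvCoreB
  cases PySem.Dict.get? pvSCALES scale_name with
  | none => rfl
  | some intervals =>
    apply PySem.List.foldl_congr_mem
    intro acc n _
    have h1 : PySem.Int.mod (n - root) 12 = (n - root) % 12 :=
      PySem.Int.mod_eq_emod_of_pos (by norm_num)
    have h2 : PySem.Int.mod (n - PySem.Int.mod root 12) 12 = (n - root % 12) % 12 := by
      rw [PySem.Int.mod_eq_emod_of_pos (by norm_num), PySem.Int.mod_eq_emod_of_pos (by norm_num)]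
    rw [h1, h2, show (n - root) % 12 = (n - root % 12) % 12 from by omega]

lemma pvAdd_fresh (s : List Int) (n : Int) (h : ∀ a ∈ s, a < n) : PySem.Set.add s n = s ++ [n] := by
  have hn : n ∉ s := fun hm => lt_irrefl n (h n hm)
  simp [PySem.Set.add, PySem.Set.contains, hn]

lemma pvFoldl_add_filter (p : Int → Prop) [DecidablePred p] :
    ∀ (xs acc : List Int), xs.Pairwise (· < ·) → (∀ n ∈ xs, ∀ a ∈ acc, a < n) →
      xs.foldl (fun s n => if p n then PySem.Set.add s n else s) acc
        = acc ++ xs.filter (fun n => decide (p n)) := by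
  intro xs
  induction xs with
  | nil => intro acc _ _; simp
  | cons n t ih =>
    intro acc hp hf
    rw [List.pairwise_cons] at hp
    have hstep : (if p n then PySem.Set.add acc n else acc) = acc ++ (if decide (p n) = true then [n] else []) := by
      by_cases h : p n <;> simp [h, pvAdd_fresh acc n (hf n (by simp))]
    simp only [List.foldl_cons, hstep]
    rw [ih _ hp.2 ?_]
    · by_cases h : p n <;> simp [h]
    · intro m hm a ha
      have hcase : a ∈ acc ∨ a = n := by
        by_cases h : p n <;> simp [h] at ha
        · tauto
        · exact Or.inl ha
      rcases hcase with h1 | rfl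
      · exact hf m (by simp [hm]) a h1
      · exact hp.1 m hm

lemma pvFoldl_foldl_flatMap {α β γ : Type} (f : β → List γ) (g : α → γ → α) :
    ∀ (l : List β) (acc : α),
      l.foldl (fun a b => (f b).foldl g a) acc = (l.flatMap f).foldl g acc := by
  intro l
  induction l with
  | nil => intro acc; simp
  | cons b t ih => intro acc; simp [List.foldl_append, ih]

lemma pvCoreA_filter (iv : List Int) (r : Int)
    (h : ((PySem.List.pyRange 0 11 1).flatMap (fun o => iv.map (fun i => o * 12 + r + i))).IsChain (· < ·)) :
    pvCoreA iv r
      = ((PySem.List.pyRange 0 11 1).flatMap (fun o => iv.map (fun i => o * 12 + r + i))).filter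
          (fun n => decide (0 ≤ n ∧ n ≤ 127)) := by
  rw [List.isChain_iff_pairwise] at h
  unfold pvCoreA
  simp only [show ∀ (o : Int) (notes : List Int),
      iv.foldl (fun notes interval =>
        if 0 ≤ o * 12 + r + interval ∧ o * 12 + r + interval ≤ 127
        then PySem.Set.add notes (o * 12 + r + interval) else notes) notes
      = (iv.map (fun i => o * 12 + r + i)).foldl
          (fun s n => if 0 ≤ n ∧ n ≤ 127 then PySem.Set.add s n else s) notes
    from fun o notes => Eq.symm List.foldl_map]
  rw [pvFoldl_foldl_flatMap]
  exact pvFoldl_add_filter _ _ _ h (by intro n _ a ha; simp [PySem.Set.empty] at ha)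

lemma pvCoreB_filter (iv : List Int) (r : Int)
    (h : (PySem.List.pyRange r 128 1).IsChain (· < ·)) :
    pvCoreB iv r
      = (PySem.List.pyRange r 128 1).filter
          (fun n => decide (PySem.Set.contains (PySem.Set.ofList iv) (PySem.Int.mod (n - r) 12) = true)) := by
  rw [List.isChain_iff_pairwise] at h
  unfold pvCoreB
  exact pvFoldl_add_filter _ _ _ h (by intro n _ a ha; simp [PySem.Set.empty] at ha)

set_option maxRecDepth 16384 in
set_option maxHeartbeats 3000000 in
lemma pvCore_eq (iv : List Int)
    (hiv : iv ∈ [[0, 2, 4, 5, 7, 9, 11], [0, 2, 3, 5, 7, 8, 10], [0, 2, 3, 5, 7, 9, 10],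
                 [0, 2, 4, 5, 7, 9, 10], [0, 2, 4, 7, 9], [0, 3, 5, 7, 10],
                 [0, 3, 5, 6, 7, 10], ([0, 1, 2, 3, 4, 5, 6, 7, 8, 9, 10, 11] : List Int)])
    (r : Int) (h0 : 0 ≤ r) (h1 : r < 12) :
    pvCoreA iv r = pvCoreB iv r := by
  fin_cases hiv <;> interval_cases r <;>
    (rw [pvCoreA_filter _ _ (by decide), pvCoreB_filter _ _ (by decide)]; decide)

lemma pvGet_mem (scale_name : String) (iv : List Int)
    (h : PySem.Dict.get? pvSCALES scale_name = some iv) :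
    iv ∈ [[0, 2, 4, 5, 7, 9, 11], [0, 2, 3, 5, 7, 8, 10], [0, 2, 3, 5, 7, 9, 10],
          [0, 2, 4, 5, 7, 9, 10], [0, 2, 4, 7, 9], [0, 3, 5, 7, 10],
          [0, 3, 5, 6, 7, 10], ([0, 1, 2, 3, 4, 5, 6, 7, 8, 9, 10, 11] : List Int)] := by
  simp only [pvSCALES, PySem.Dict.get?_mk_cons] at h
  split_ifs at h
  all_goals first
    | (injection h with h; subst h; decide)
    | (simp [PySem.Dict.get?] at h)

-- ===== VERDICT (by name: the statement is the Claim_ definition above) =====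
theorem get_scale_notes_spec : Claim_equal_get_scale_notes := by
  intro root scale_name _
  unfold Spec_get_scale_notes
  rw [pvA_core, pvB_core]
  cases hget : PySem.Dict.get? pvSCALES scale_name with
  | none => rfl
  | some iv =>
    exact pvCore_eq iv (pvGet_mem scale_name iv hget) (PySem.Int.mod root 12)
      (PySem.Int.mod_nonneg _ (by norm_num)) (PySem.Int.mod_lt _ (by norm_num))
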